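-- pv_equiv track=rewrite | github.com/wkdt07/Today-I-Learned | 월말평가/1월/풀이.py | tidy_up_company
-- ===== SOURCE A (Python) =====
-- def tidy_up_company(email_list):
--     result = {}
--     for email in email_list:
--         if result.get(email):
--             result[email] += 1
--
--         else:
--             result[email] = 1
--     return result
-- ===== SOURCE B (Python) =====
-- def tidy_up_company(email_list):
--     # idiomatic: distinct emails in first-occurrence order, each counted by a full scan
--     return {e: email_list.count(e) for e in dict.fromkeys(email_list)}
-- ===== Notes on version B (the rewrite author's own statement) =====
-- stated objective: idiomatic
-- what changed: B keeps no running tally: it first collects the distinct emails (dict.fromkeys) and then counts each one with a separate full scan via list.count, instead of A's single pass updating a dict of counters.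
import Mathlib
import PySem

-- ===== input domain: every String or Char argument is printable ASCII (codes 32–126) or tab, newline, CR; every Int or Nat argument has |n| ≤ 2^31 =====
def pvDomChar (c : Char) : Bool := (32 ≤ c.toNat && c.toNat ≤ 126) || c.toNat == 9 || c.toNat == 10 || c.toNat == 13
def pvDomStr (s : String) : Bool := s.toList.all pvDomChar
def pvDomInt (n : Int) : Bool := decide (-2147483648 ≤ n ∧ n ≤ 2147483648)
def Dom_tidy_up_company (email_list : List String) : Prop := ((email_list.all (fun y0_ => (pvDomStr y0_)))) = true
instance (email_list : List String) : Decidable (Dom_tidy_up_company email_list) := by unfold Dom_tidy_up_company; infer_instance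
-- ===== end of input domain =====

-- B replaces A's single-pass running tally by "distinct keys first, then one full counting scan per key" (idiomatic; not faster).

-- ===== PORT A =====
-- A: one pass, a dict of counters; 'if result.get(email):' is the truthiness test on the looked-up Option.
def tidy_up_company (email_list : List String) : List (String × Int) :=
  (email_list.foldl
    (fun result email =>
      match result.get? email with
      | some v => if v ≠ 0 then result.insert email (v + 1) else result.insert email 1
      | none => result.insert email 1)
    (PySem.Dict.empty : PySem.Dict String Int)).items

-- ===== PORT B =====
-- B: dict.fromkeys = PySem.List.dedup, list.count = PySem.List.count.
def tidy_up_company_alt (email_list : List String) : List (String × Int) :=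
  (PySem.List.dedup email_list).map (fun e => (e, PySem.List.count email_list e))

-- ===== PRECONDITION & SPEC =====
def Spec_tidy_up_company (email_list : List String) (out : List (String × Int)) : Prop := out = tidy_up_company_alt email_list
instance (email_list : List String) (out : List (String × Int)) : Decidable (Spec_tidy_up_company email_list out) := by unfold Spec_tidy_up_company; infer_instance

-- ===== CLAIM (what is proved, stated in full; the proofs are below) =====
def Claim_equal_tidy_up_company : Prop := ∀ (email_list : List String), Dom_tidy_up_company email_list → Spec_tidy_up_company email_list (tidy_up_company email_list)

-- ===== LEMMAS AND PROOFS =====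

-- A's loop body is extensionally the Counter step: it always stores (old count, default 0) + 1.
theorem tidy_step_eq (d : PySem.Dict String Int) (e : String) :
    (match d.get? e with
      | some v => if v ≠ 0 then d.insert e (v + 1) else d.insert e 1
      | none => d.insert e 1) = d.insert e (d.getD e 0 + 1) := by
  cases h : d.get? e with
  | none => simp [PySem.Dict.getD_eq_get?_getD, h]
  | some v =>
    by_cases hv : v = 0 <;>
      simp [hv, PySem.Dict.getD_eq_get?_getD, h]

-- ===== VERDICT (by name: the statement is the Claim_ definition above) =====
theorem tidy_up_company_spec : Claim_equal_tidy_up_company := by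
  intro l _
  unfold Spec_tidy_up_company tidy_up_company tidy_up_company_alt
  have hfun : (fun (result : PySem.Dict String Int) (email : String) =>
      match result.get? email with
      | some v => if v ≠ 0 then result.insert email (v + 1) else result.insert email 1
      | none => result.insert email 1)
      = fun d x => d.insert x (d.getD x 0 + 1) :=
    funext fun d => funext fun e => tidy_step_eq d e
  rw [hfun, PySem.Dict.foldl_insert_getD_add_one_eq_counter, PySem.Dict.items_counter]
  simp [PySem.List.dedup_eq_ofList, PySem.List.count_eq]
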